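-- pv_equiv track=rewrite | github.com/ShlomiRex/CTF-CSA2020 | Programming/Tricky Guess/test.py | resolve_undecided_mappings
-- ===== SOURCE A (Python) =====
-- def resolve_undecided_mappings(resolved_char , undecided_mapping):
--     """
--     Loop pairwise mappings that one of the chars is resolved_char
--     Lets say:
--         undecided_mappings =  [['i', 'b'], ['i', 'r']]
--     Then we get:
--         char 'g' is in secret word and char 'r' is not in secret word
--     So we say 'g' is resolved and also 'r' is resolved (100% we know)
--     That means that char 'i' is also not in secret word, because it has pairwise: ['i', 'r']
--     Because we resolved 'i' we call the function again
--     and it should return also ['i', 'b'] because it has 'i' in it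
--     So in total it should returns: 'r', 'i', 'b'
--     """
--     def check_all_pairs(char):
--         other_chars = set()
--         to_remove = []
--         for x in undecided_mapping:
--             if char == x[0]:
--                 other_chars.add(x[1])
--                 to_remove.append(x)
--             elif char == x[1]:
--                 other_chars.add(x[0])
--                 to_remove.append(x)
--         for x in to_remove:
--             undecided_mapping.remove(x)
--         return other_chars
--
--     res = set(resolved_char)
--     while True:
--         changed = False
--         for x in list(res):
--             ret = check_all_pairs(x)
--             if len(ret) > 0:
--                 res = res | ret
--                 changed = True
--         if changed == False:
--             break
--
--     return res
-- ===== SOURCE B (Python) =====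
-- def resolve_undecided_mappings(resolved_char, undecided_mapping):
--     # Single-pass BFS over the pair graph: each vertex is dequeued once and the
--     # edge list is filtered as edges are consumed (A re-scans every resolved
--     # char against every remaining pair on every round until nothing changes).
--     seen = set(resolved_char)
--     queue = list(dict.fromkeys(resolved_char))
--     edges = list(undecided_mapping)
--     i = 0
--     while i < len(queue):
--         u = queue[i]
--         i += 1
--         rest = []
--         for e in edges:
--             if u == e[0] or u == e[1]:
--                 v = e[1] if u == e[0] else e[0]
--                 if v not in seen:
--                     seen.add(v)
--                     queue.append(v)
--             else:
--                 rest.append(e)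
--         edges = rest
--     return seen
-- ===== Notes on version B (the rewrite author's own statement) =====
-- stated objective: faster
-- what changed: Replaces A's repeat-until-unchanged loop, which on every round rescans every already-resolved char against the whole remaining pair list, with a single-pass BFS worklist in which each char is dequeued and scanned exactly once while consumed pairs are filtered out of the edge list.
import Mathlib
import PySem

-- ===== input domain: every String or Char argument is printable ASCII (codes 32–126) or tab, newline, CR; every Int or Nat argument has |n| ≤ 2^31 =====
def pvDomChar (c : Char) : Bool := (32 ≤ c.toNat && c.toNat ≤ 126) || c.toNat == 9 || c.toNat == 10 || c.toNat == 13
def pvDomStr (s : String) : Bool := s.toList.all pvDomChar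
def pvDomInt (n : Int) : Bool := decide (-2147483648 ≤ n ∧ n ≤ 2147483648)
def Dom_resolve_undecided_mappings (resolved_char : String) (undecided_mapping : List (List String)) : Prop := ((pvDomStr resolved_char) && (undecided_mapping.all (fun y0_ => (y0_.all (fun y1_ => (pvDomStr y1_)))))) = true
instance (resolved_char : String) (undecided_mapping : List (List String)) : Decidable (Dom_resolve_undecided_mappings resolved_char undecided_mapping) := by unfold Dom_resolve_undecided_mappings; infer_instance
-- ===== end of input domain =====

-- B replaces A's repeat-until-unchanged rescanning of all resolved chars with a single-pass BFS
-- worklist (each char scanned once); equivalence is about the RETURN value only: Python A also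
-- removes the consumed pairs from `undecided_mapping` in place, B leaves its arguments untouched.

-- ===== PORT A =====
-- x[0] / x[1] are ported with pyGetD default "": Python raises IndexError on pairs shorter than 2
-- whenever the scan is reached; exactly those inputs are excluded by Pre_ below.

-- loop body of check_all_pairs' scan, building (other_chars, to_remove)
def pvCapBody (char : String) (acc : PySem.Set String × List (List String))
    (x : List String) : PySem.Set String × List (List String) :=
  if char == PySem.List.pyGetD x 0 "" then
    (PySem.Set.add acc.1 (PySem.List.pyGetD x 1 ""), acc.2 ++ [x])
  else if char == PySem.List.pyGetD x 1 "" then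
    (PySem.Set.add acc.1 (PySem.List.pyGetD x 0 ""), acc.2 ++ [x])
  else acc

def pvCapScan (char : String) (edges : List (List String)) :
    PySem.Set String × List (List String) :=
  edges.foldl (pvCapBody char) (PySem.Set.empty, [])

-- 'for x in to_remove: undecided_mapping.remove(x)' (the none branch is unreachable:
-- every collected pair is still present, so Python's list.remove always succeeds here)
def pvRemoveAll (edges : List (List String)) (to_remove : List (List String)) : List (List String) :=
  to_remove.foldl (fun es x =>
    match PySem.List.remove? es x with
    | some es' => es'
    | none => es) edges

def pvCheckAllPairs (char : String) (edges : List (List String)) :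
    PySem.Set String × List (List String) :=
  let r := pvCapScan char edges
  (r.1, pvRemoveAll edges r.2)

-- body of 'for x in list(res)'; state = (res, undecided_mapping, changed)
def pvPassBody (st : PySem.Set String × List (List String) × Bool) (x : String) :
    PySem.Set String × List (List String) × Bool :=
  let r := pvCheckAllPairs x st.2.1
  if PySem.Set.len r.1 > 0 then (PySem.Set.union st.1 r.1, r.2, true)
  else (st.1, r.2, st.2.2)

def pvPass (snapshot : List String) (res : PySem.Set String)
    (edges : List (List String)) (changed : Bool) :
    PySem.Set String × List (List String) × Bool :=
  snapshot.foldl pvPassBody (res, edges, changed)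

-- 'while True: … if changed == False: break'; every changed pass removes at least one pair,
-- so |undecided_mapping| + 2 rounds of fuel always reach the break.
def pvLoop : Nat → PySem.Set String → List (List String) → PySem.Set String
  | 0, res, _ => res
  | fuel + 1, res, edges =>
    let st := pvPass res res edges false
    if st.2.2 then pvLoop fuel st.1 st.2.1 else st.1

def resolve_undecided_mappings (resolved_char : String) (undecided_mapping : List (List String)) : List String :=
  pvLoop (undecided_mapping.length + 2)
    (PySem.Set.ofList (resolved_char.toList.map (fun c => String.ofList [c]))) undecided_mapping

-- ===== PORT B =====
-- loop body of B's edge scan: state = (rest, seen, appended queue tail)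
def pvBfsBody (u : String) (st : List (List String) × PySem.Set String × List String)
    (e : List String) : List (List String) × PySem.Set String × List String :=
  let e0 := PySem.List.pyGetD e 0 ""
  let e1 := PySem.List.pyGetD e 1 ""
  if u == e0 || u == e1 then
    let v := if u == e0 then e1 else e0
    if PySem.Set.contains st.2.1 v then st
    else (st.1, PySem.Set.add st.2.1 v, st.2.2 ++ [v])
  else (st.1 ++ [e], st.2.1, st.2.2)

-- processing one dequeued char: returns (remaining edges, seen, newly enqueued chars)
def pvBfsStep (u : String) (edges : List (List String)) (seen : PySem.Set String) :
    List (List String) × PySem.Set String × List String :=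
  edges.foldl (pvBfsBody u) ([], seen, [])

-- 'while i < len(queue)': pending = queue[i:]; the loop terminates because every newly
-- enqueued char consumes at least one edge (pvBfsStep_size below), so fuel
-- 2*|edges| + |pending| always suffices; the fuel-0 fallback is never reached.
def pvBfsGo : Nat → List (List String) → List String → PySem.Set String → PySem.Set String
  | 0, _, _, seen => seen
  | fuel + 1, edges, pending, seen =>
    match pending with
    | [] => seen
    | u :: rest =>
      let st := pvBfsStep u edges seen
      pvBfsGo fuel st.1 (rest ++ st.2.2) st.2.1

def pvBfs (edges : List (List String)) (pending : List String) (seen : PySem.Set String) :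
    PySem.Set String :=
  pvBfsGo (2 * edges.length + pending.length) edges pending seen

def resolve_undecided_mappings_alt (resolved_char : String) (undecided_mapping : List (List String)) : List String :=
  let start := PySem.Set.ofList (resolved_char.toList.map (fun c => String.ofList [c]))
  pvBfs undecided_mapping start start

-- ===== PRECONDITION & SPEC =====
-- Pre_ excludes exactly the inputs on which A raises IndexError: a nonempty resolved_char
-- together with some pair of fewer than 2 entries (x[0]/x[1] out of range).
def Pre_resolve_undecided_mappings (resolved_char : String) (undecided_mapping : List (List String)) : Prop :=
  resolved_char = "" ∨ ∀ x ∈ undecided_mapping, 2 ≤ x.length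
instance (resolved_char : String) (undecided_mapping : List (List String)) : Decidable (Pre_resolve_undecided_mappings resolved_char undecided_mapping) := by unfold Pre_resolve_undecided_mappings; infer_instance

def pvWitness_resolve_undecided_mappings : String × List (List String) :=
  ("a", [["b", "c"]])

def Spec_resolve_undecided_mappings (resolved_char : String) (undecided_mapping : List (List String)) (out : List String) : Prop := out = resolve_undecided_mappings_alt resolved_char undecided_mapping
instance (resolved_char : String) (undecided_mapping : List (List String)) (out : List String) : Decidable (Spec_resolve_undecided_mappings resolved_char undecided_mapping out) := by unfold Spec_resolve_undecided_mappings; infer_instance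

-- ===== CLAIM (what is proved, stated in full; the proofs are below) =====
def Claim_equal_resolve_undecided_mappings : Prop := ∀ (resolved_char : String) (undecided_mapping : List (List String)), Dom_resolve_undecided_mappings resolved_char undecided_mapping → Pre_resolve_undecided_mappings resolved_char undecided_mapping → Spec_resolve_undecided_mappings resolved_char undecided_mapping (resolve_undecided_mappings resolved_char undecided_mapping)

-- ===== LEMMAS AND PROOFS =====

-- incidence test and other endpoint of a pair, as A's and B's branches compute them
def pvInc (u : String) (e : List String) : Bool :=
  u == PySem.List.pyGetD e 0 "" || u == PySem.List.pyGetD e 1 ""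
def pvOther (u : String) (e : List String) : String :=
  if u == PySem.List.pyGetD e 0 "" then PySem.List.pyGetD e 1 "" else PySem.List.pyGetD e 0 ""

theorem pvCapScan_aux (u : String) (edges : List (List String)) :
    ∀ (acc : PySem.Set String × List (List String)),
    edges.foldl (pvCapBody u) acc =
      (PySem.Set.update acc.1 ((edges.filter (pvInc u)).map (pvOther u)),
       acc.2 ++ edges.filter (pvInc u)) := by
  induction edges with
  | nil => intro acc; simp [PySem.Set.update]
  | cons e es ih =>
    intro acc
    by_cases h0 : (u == PySem.List.pyGetD e 0 "") = true
    · simp only [List.foldl_cons, pvCapBody, h0, if_true]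
      rw [ih]
      simp [pvInc, pvOther, h0, PySem.Set.update]
    · by_cases h1 : (u == PySem.List.pyGetD e 1 "") = true
      · simp only [List.foldl_cons, pvCapBody, h0, h1, if_true]
        rw [ih]
        simp [pvInc, pvOther, h0, h1, PySem.Set.update]
      · simp only [List.foldl_cons, pvCapBody, h0, h1]
        rw [ih]
        simp [pvInc, h0, h1]

theorem pvCapScan_eq (u : String) (edges : List (List String)) :
    pvCapScan u edges =
      (PySem.Set.ofList ((edges.filter (pvInc u)).map (pvOther u)), edges.filter (pvInc u)) := by
  have h := pvCapScan_aux u edges (PySem.Set.empty, [])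
  simpa [pvCapScan, PySem.Set.ofList, PySem.Set.update, PySem.Set.empty] using h

theorem pvRemoveAll_cons_of_ne (ys : List (List String)) :
    ∀ (x : List String) (l : List (List String)), (∀ y ∈ ys, y ≠ x) →
    pvRemoveAll (x :: l) ys = x :: pvRemoveAll l ys := by
  induction ys with
  | nil => intro x l _; simp [pvRemoveAll]
  | cons y ys ih =>
    intro x l h
    have hxy : x ≠ y := fun he => (h y (by simp)) (by rw [he])
    have hrest : ∀ y' ∈ ys, y' ≠ x := fun y' hy' => h y' (List.mem_cons_of_mem _ hy')
    simp only [pvRemoveAll, List.foldl_cons]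
    have hrw : PySem.List.remove? (x :: l) y = (PySem.List.remove? l y).map (x :: ·) :=
      PySem.List.remove?_cons_of_ne (x := x) (v := y) (xs := l) hxy
    rw [hrw]
    cases hr : PySem.List.remove? l y with
    | none =>
      simpa [pvRemoveAll, hr] using ih x l hrest
    | some l' =>
      simpa [pvRemoveAll, hr] using ih x l' hrest

theorem pvRemoveAll_filter (p : List String → Bool) (l : List (List String)) :
    pvRemoveAll l (l.filter p) = l.filter (fun e => !p e) := by
  induction l with
  | nil => simp [pvRemoveAll]
  | cons a l ih =>
    by_cases hp : p a = true
    · simp only [List.filter_cons, hp, if_true, Bool.not_true, Bool.false_eq_true, if_false]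
      simp only [pvRemoveAll, List.foldl_cons, PySem.List.remove?_cons_self]
      simpa [pvRemoveAll] using ih
    · have hne : ∀ y ∈ l.filter p, y ≠ a := by
        intro y hy he
        have hpy := List.of_mem_filter hy
        rw [he] at hpy
        exact hp hpy
      have hpa : p a = false := by simpa using hp
      simp only [List.filter_cons, hpa, Bool.false_eq_true, if_false, Bool.not_false, if_true]
      rw [pvRemoveAll_cons_of_ne _ _ _ hne, ih]

theorem pvCheckAllPairs_eq (u : String) (edges : List (List String)) :
    pvCheckAllPairs u edges =
      (PySem.Set.ofList ((edges.filter (pvInc u)).map (pvOther u)),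
       edges.filter (fun e => !pvInc u e)) := by
  simp only [pvCheckAllPairs, pvCapScan_eq]
  rw [pvRemoveAll_filter]

-- each newly enqueued char consumes an edge: justifies pvBfs's fuel bound
theorem pvBfsStep_size_aux (u : String) (edges : List (List String)) :
    ∀ (st : List (List String) × PySem.Set String × List String),
    (edges.foldl (pvBfsBody u) st).1.length + (edges.foldl (pvBfsBody u) st).2.2.length
      ≤ edges.length + st.1.length + st.2.2.length := by
  induction edges with
  | nil => intro st; simp
  | cons e es ih =>
    intro st
    have h := ih (pvBfsBody u st e)
    simp only [List.foldl_cons, List.length_cons] at *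
    have : (pvBfsBody u st e).1.length + (pvBfsBody u st e).2.2.length
        ≤ st.1.length + st.2.2.length + 1 := by
      simp only [pvBfsBody]
      split_ifs <;> simp <;> omega
    omega

theorem pvBfsStep_size (u : String) (edges : List (List String)) (seen : PySem.Set String) :
    (pvBfsStep u edges seen).1.length + (pvBfsStep u edges seen).2.2.length ≤ edges.length := by
  have h := pvBfsStep_size_aux u edges ([], seen, [])
  simpa [pvBfsStep] using h

theorem pvBfsGo_nil (fuel : Nat) (edges : List (List String)) (seen : PySem.Set String) :
    pvBfsGo fuel edges [] seen = seen := by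
  cases fuel <;> rfl

theorem pvBfsGo_congr (f1 : Nat) :
    ∀ (f2 : Nat) (edges : List (List String)) (pending : List String) (seen : PySem.Set String),
    2 * edges.length + pending.length ≤ f1 → 2 * edges.length + pending.length ≤ f2 →
    pvBfsGo f1 edges pending seen = pvBfsGo f2 edges pending seen := by
  induction f1 with
  | zero =>
    intro f2 edges pending seen h1 _
    have hp : pending = [] := by
      cases pending with
      | nil => rfl
      | cons a l => simp [List.length_cons] at h1
    subst hp
    rw [pvBfsGo_nil, pvBfsGo_nil]
  | succ f ih =>
    intro f2 edges pending seen h1 h2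
    cases pending with
    | nil => rw [pvBfsGo_nil, pvBfsGo_nil]
    | cons u rest =>
      obtain ⟨f2', rfl⟩ : ∃ k, f2 = k + 1 := ⟨f2 - 1, by simp at h2; omega⟩
      simp only [pvBfsGo]
      have hst := pvBfsStep_size u edges seen
      apply ih
      · simp only [List.length_append, List.length_cons] at *; omega
      · simp only [List.length_append, List.length_cons] at *; omega

theorem pvBfs_nil (edges : List (List String)) (seen : PySem.Set String) :
    pvBfs edges [] seen = seen := pvBfsGo_nil _ edges seen

theorem pvBfs_cons (u : String) (rest : List String) (edges : List (List String))
    (seen : PySem.Set String) :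
    pvBfs edges (u :: rest) seen =
      pvBfs (pvBfsStep u edges seen).1 (rest ++ (pvBfsStep u edges seen).2.2)
        (pvBfsStep u edges seen).2.1 := by
  unfold pvBfs
  have hst := pvBfsStep_size u edges seen
  have h : 2 * edges.length + (u :: rest).length = (2 * edges.length + rest.length) + 1 := by
    simp only [List.length_cons]
    omega
  rw [h]
  simp only [pvBfsGo]
  apply pvBfsGo_congr
  · simp only [List.length_append]; omega
  · exact Nat.le_refl _

-- B's seen/new accumulator
def pvAddNew (st : PySem.Set String × List String) (v : String) :
    PySem.Set String × List String :=
  if PySem.Set.contains st.1 v then st else (PySem.Set.add st.1 v, st.2 ++ [v])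

theorem pvBfsStep_aux (u : String) (edges : List (List String)) :
    ∀ (st : List (List String) × PySem.Set String × List String),
    edges.foldl (pvBfsBody u) st =
      (st.1 ++ edges.filter (fun e => !pvInc u e),
       ((edges.filter (pvInc u)).map (pvOther u)).foldl pvAddNew (st.2.1, st.2.2)) := by
  induction edges with
  | nil => intro st; simp
  | cons e es ih =>
    intro st
    by_cases hI : pvInc u e = true
    · have hb : pvBfsBody u st e = (st.1, pvAddNew (st.2.1, st.2.2) (pvOther u e)) := by
        have hI' := hI
        simp only [pvInc] at hI'
        simp only [pvBfsBody, pvAddNew, pvOther, hI', if_true]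
        split_ifs <;> simp
      simp only [List.foldl_cons, hb, List.filter_cons, hI, if_true, Bool.not_true,
        Bool.false_eq_true, if_false, List.map_cons, List.foldl_cons]
      rw [ih]
    · have hI' : (u == PySem.List.pyGetD e 0 "" || u == PySem.List.pyGetD e 1 "") = false := by
        simpa [pvInc] using hI
      have hb : pvBfsBody u st e = (st.1 ++ [e], st.2.1, st.2.2) := by
        simp only [pvBfsBody, hI', Bool.false_eq_true, if_false]
      have hIf : pvInc u e = false := by simpa using hI
      simp only [List.foldl_cons, hb, List.filter_cons, hIf, Bool.false_eq_true, if_false,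
        Bool.not_false, if_true]
      rw [ih]
      simp

theorem pvBfsStep_eq (u : String) (edges : List (List String)) (seen : PySem.Set String) :
    pvBfsStep u edges seen =
      (edges.filter (fun e => !pvInc u e),
       ((edges.filter (pvInc u)).map (pvOther u)).foldl pvAddNew (seen, [])) := by
  have h := pvBfsStep_aux u edges ([], seen, [])
  simpa [pvBfsStep] using h

theorem pvAddNew_fst (vs : List String) :
    ∀ (s : PySem.Set String) (n : List String),
    (vs.foldl pvAddNew (s, n)).1 = PySem.Set.update s vs := by
  induction vs with
  | nil => intro s n; simp [PySem.Set.update]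
  | cons v vs ih =>
    intro s n
    by_cases hc : PySem.Set.contains s v = true
    · have hv : v ∈ s := by simpa using hc
      have ha : PySem.Set.add s v = s := PySem.Set.add_of_mem hv
      simp only [List.foldl_cons, pvAddNew, hc, if_true, PySem.Set.update, List.foldl_cons, ha]
      exact ih s n
    · have hcf : PySem.Set.contains s v = false := by simpa using hc
      have hv : v ∉ s := by simpa using hcf
      have ha : PySem.Set.add s v = s ++ [v] := PySem.Set.add_of_not_mem hv
      simp only [List.foldl_cons, pvAddNew, hcf, Bool.false_eq_true, if_false,
        PySem.Set.update, List.foldl_cons, ha]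
      exact ih (s ++ [v]) (n ++ [v])

theorem pvAddNew_suffix (vs : List String) :
    ∀ (s : PySem.Set String) (n : List String),
    ∃ t, (vs.foldl pvAddNew (s, n)).1 = s ++ t ∧ (vs.foldl pvAddNew (s, n)).2 = n ++ t := by
  induction vs with
  | nil => intro s n; exact ⟨[], by simp⟩
  | cons v vs ih =>
    intro s n
    by_cases hc : PySem.Set.contains s v = true
    · simpa only [List.foldl_cons, pvAddNew, hc, if_true] using ih s n
    · have hcf : PySem.Set.contains s v = false := by simpa using hc
      have hv : v ∉ s := by simpa using hcf
      have ha : PySem.Set.add s v = s ++ [v] := PySem.Set.add_of_not_mem hv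
      obtain ⟨t, h1, h2⟩ := ih (s ++ [v]) (n ++ [v])
      refine ⟨v :: t, ?_, ?_⟩
      · simp only [List.foldl_cons, pvAddNew, hcf, Bool.false_eq_true, if_false, ha]
        rw [h1]; simp
      · simp only [List.foldl_cons, pvAddNew, hcf, Bool.false_eq_true, if_false, ha]
        rw [h2]; simp

theorem pvUnion_ofList (s : PySem.Set String) (vs : List String) :
    PySem.Set.union s (PySem.Set.ofList vs) = PySem.Set.update s vs := by
  induction vs using List.reverseRecOn with
  | nil => simp [PySem.Set.union, PySem.Set.update, PySem.Set.ofList, PySem.Set.empty]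
  | append_singleton vs v ih =>
    have hof : PySem.Set.ofList (vs ++ [v]) = PySem.Set.add (PySem.Set.ofList vs) v := by
      simp [PySem.Set.ofList, List.foldl_append]
    by_cases hv : v ∈ PySem.Set.ofList vs
    · rw [hof, PySem.Set.add_of_mem hv, ih]
      have hm : v ∈ PySem.Set.update s vs :=
        (PySem.Set.mem_update s vs v).2 (Or.inr ((PySem.Set.mem_ofList vs v).1 hv))
      simp only [PySem.Set.update, List.foldl_append, List.foldl_cons, List.foldl_nil]
      exact (PySem.Set.add_of_mem (by simpa [PySem.Set.update] using hm)).symm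
    · rw [hof, PySem.Set.add_of_not_mem hv]
      simp only [PySem.Set.union, PySem.Set.update, List.foldl_append, List.foldl_cons,
        List.foldl_nil] at *
      rw [ih]

theorem pvOfList_ne_nil (vs : List String) (h : vs ≠ []) : PySem.Set.ofList vs ≠ [] := by
  obtain ⟨w, ws, rfl⟩ := List.exists_cons_of_ne_nil h
  intro hc
  have : w ∈ PySem.Set.ofList (w :: ws) := (PySem.Set.mem_ofList _ _).2 (by simp)
  rw [hc] at this
  exact (List.not_mem_nil).elim this

-- chained bfs steps over a list of chars, recording the enqueued chars and
-- whether any processed char still had an incident pair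
structure PvSt where
  edges : List (List String)
  seen : PySem.Set String
  new : List String
  flag : Bool

def pvChain : List String → List (List String) → PySem.Set String → PvSt
  | [], edges, seen => ⟨edges, seen, [], false⟩
  | u :: L, edges, seen =>
    let st := pvBfsStep u edges seen
    let c := pvChain L st.1 st.2.1
    ⟨c.edges, c.seen, st.2.2 ++ c.new, (decide (edges.filter (pvInc u) ≠ [])) || c.flag⟩

theorem pvFilter_not_of_filter_nil (p : List String → Bool) (l : List (List String))
    (h : l.filter p = []) : l.filter (fun e => !p e) = l := by
  rw [List.filter_eq_nil_iff] at h
  rw [List.filter_eq_self]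
  intro a ha
  simpa using h a ha

theorem pvBfsStep_noop (u : String) (edges : List (List String)) (seen : PySem.Set String)
    (h : edges.filter (pvInc u) = []) :
    pvBfsStep u edges seen = (edges, seen, []) := by
  rw [pvBfsStep_eq, h, pvFilter_not_of_filter_nil _ _ h]
  simp

theorem pvPass_eq_chain (L : List String) :
    ∀ (res : PySem.Set String) (edges : List (List String)) (ch : Bool),
    pvPass L res edges ch =
      ((pvChain L edges res).seen, (pvChain L edges res).edges, ch || (pvChain L edges res).flag) := by
  induction L with
  | nil => intro res edges ch; simp [pvPass, pvChain]
  | cons u L ih =>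
    intro res edges ch
    have hstep : pvPass (u :: L) res edges ch
        = pvPass L (pvPassBody (res, edges, ch) u).1 (pvPassBody (res, edges, ch) u).2.1
            (pvPassBody (res, edges, ch) u).2.2 := by
      simp [pvPass, List.foldl_cons]
    by_cases hP : edges.filter (pvInc u) = []
    · have hbody : pvPassBody (res, edges, ch) u = (res, edges, ch) := by
        simp only [pvPassBody, pvCheckAllPairs_eq, hP, List.map_nil,
          pvFilter_not_of_filter_nil _ _ hP]
        simp [PySem.Set.ofList, PySem.Set.empty, PySem.Set.len]
      rw [hstep, hbody, ih]
      have hchain : pvChain (u :: L) edges res =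
          ⟨(pvChain L edges res).edges, (pvChain L edges res).seen,
           (pvChain L edges res).new, (pvChain L edges res).flag⟩ := by
        simp only [pvChain, pvBfsStep_noop u edges res hP, hP]
        simp
      rw [hchain]
    · have hne : (edges.filter (pvInc u)).map (pvOther u) ≠ [] := by
        simpa using hP
      have hoc : PySem.Set.ofList ((edges.filter (pvInc u)).map (pvOther u)) ≠ [] :=
        pvOfList_ne_nil _ hne
      have hlen : PySem.Set.len (PySem.Set.ofList ((edges.filter (pvInc u)).map (pvOther u))) > 0 := by
        simp only [PySem.Set.len]
        exact_mod_cast List.length_pos_of_ne_nil hoc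
      have hbody : pvPassBody (res, edges, ch) u =
          (PySem.Set.union res (PySem.Set.ofList ((edges.filter (pvInc u)).map (pvOther u))),
           edges.filter (fun e => !pvInc u e), true) := by
        simp only [pvPassBody, pvCheckAllPairs_eq]
        rw [if_pos hlen]
      have hseen : PySem.Set.union res (PySem.Set.ofList ((edges.filter (pvInc u)).map (pvOther u)))
          = (pvBfsStep u edges res).2.1 := by
        rw [pvUnion_ofList, pvBfsStep_eq, ← pvAddNew_fst]
      have hedges : edges.filter (fun e => !pvInc u e) = (pvBfsStep u edges res).1 := by
        rw [pvBfsStep_eq]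
      rw [hstep, hbody]
      rw [hseen, hedges, ih]
      simp only [pvChain, Bool.true_or]
      simp [hP]

theorem pvChain_clean (L : List String) :
    ∀ (edges : List (List String)) (seen : PySem.Set String),
    (∀ u ∈ L, edges.filter (pvInc u) = []) →
    pvChain L edges seen = ⟨edges, seen, [], false⟩ := by
  induction L with
  | nil => intro edges seen _; rfl
  | cons u L ih =>
    intro edges seen h
    have hu : edges.filter (pvInc u) = [] := h u (by simp)
    simp only [pvChain, pvBfsStep_noop u edges seen hu, hu]
    rw [ih edges seen (fun v hv => h v (List.mem_cons_of_mem _ hv))]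
    simp

theorem pvChain_of_flag_false (L : List String) :
    ∀ (edges : List (List String)) (seen : PySem.Set String),
    (pvChain L edges seen).flag = false →
    pvChain L edges seen = ⟨edges, seen, [], false⟩ := by
  induction L with
  | nil => intro edges seen _; rfl
  | cons u L ih =>
    intro edges seen h
    simp only [pvChain, Bool.or_eq_false_iff, decide_eq_false_iff_not, not_not] at h
    obtain ⟨hP, hflag⟩ := h
    simp only [pvChain, pvBfsStep_noop u edges seen hP, hP]
    rw [ih edges seen (by
      have := pvBfsStep_noop u edges seen hP
      simpa [pvChain, this] using hflag)]
    simp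

theorem pvChain_seen (L : List String) :
    ∀ (edges : List (List String)) (seen : PySem.Set String),
    (pvChain L edges seen).seen = seen ++ (pvChain L edges seen).new := by
  induction L with
  | nil => intro edges seen; simp [pvChain]
  | cons u L ih =>
    intro edges seen
    have hsuffix : (pvBfsStep u edges seen).2.1 = seen ++ (pvBfsStep u edges seen).2.2 := by
      rw [pvBfsStep_eq]
      obtain ⟨t, h1, h2⟩ := pvAddNew_suffix ((edges.filter (pvInc u)).map (pvOther u)) seen []
      simp only [h1, h2]
      simp
    simp only [pvChain]
    rw [ih, hsuffix]
    simp

theorem pvChain_sublist (L : List String) :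
    ∀ (edges : List (List String)) (seen : PySem.Set String),
    (pvChain L edges seen).edges.Sublist edges := by
  induction L with
  | nil => intro edges seen; simp [pvChain]
  | cons u L ih =>
    intro edges seen
    have h1 : (pvBfsStep u edges seen).1.Sublist edges := by
      rw [pvBfsStep_eq]
      exact List.filter_sublist
    exact (ih _ _).trans h1

theorem pvFilter_nil_of_sublist (p : List String → Bool) (l₁ l₂ : List (List String))
    (h : l₁.Sublist l₂) (hp : l₂.filter p = []) : l₁.filter p = [] := by
  rw [List.filter_eq_nil_iff] at *
  exact fun a ha => hp a (h.subset ha)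

theorem pvChain_mem_clean (L : List String) :
    ∀ (edges : List (List String)) (seen : PySem.Set String) (u : String), u ∈ L →
    (pvChain L edges seen).edges.filter (pvInc u) = [] := by
  induction L with
  | nil => intro _ _ _ h; cases h
  | cons v L ih =>
    intro edges seen u hu
    rcases List.mem_cons.1 hu with rfl | hu
    · have hstep : (pvBfsStep u edges seen).1.filter (pvInc u) = [] := by
        rw [pvBfsStep_eq]
        rw [List.filter_eq_nil_iff]
        intro a ha
        have := (List.mem_filter.1 ha).2
        simpa using this
      simp only [pvChain]
      exact pvFilter_nil_of_sublist _ _ _ (pvChain_sublist L _ _) hstep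
    · simp only [pvChain]
      exact ih _ _ u hu

theorem pvChain_len (L : List String) :
    ∀ (edges : List (List String)) (seen : PySem.Set String),
    (pvChain L edges seen).flag = true →
    (pvChain L edges seen).edges.length < edges.length := by
  induction L with
  | nil => intro edges seen h; simp [pvChain] at h
  | cons u L ih =>
    intro edges seen h
    by_cases hP : edges.filter (pvInc u) = []
    · simp only [pvChain, pvBfsStep_noop u edges seen hP, hP] at h ⊢
      simp only [ne_eq, not_true_eq_false, decide_false, Bool.false_or] at h
      · exact ih edges seen (by simpa using h)
    · have hlen : (edges.filter (fun e => !pvInc u e)).length < edges.length := by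
        obtain ⟨x, hx⟩ := List.exists_mem_of_ne_nil _ hP
        have hxl := List.mem_filter.1 hx
        refine List.length_filter_lt_length_iff_exists.2 ⟨x, hxl.1, by simp [hxl.2]⟩
      have hsub := pvChain_sublist L (pvBfsStep u edges seen).1 (pvBfsStep u edges seen).2.1
      have h1 : (pvBfsStep u edges seen).1 = edges.filter (fun e => !pvInc u e) := by
        rw [pvBfsStep_eq]
      simp only [pvChain]
      calc (pvChain L (pvBfsStep u edges seen).1 (pvBfsStep u edges seen).2.1).edges.length
          ≤ (pvBfsStep u edges seen).1.length := hsub.length_le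
        _ = (edges.filter (fun e => !pvInc u e)).length := by rw [h1]
        _ < edges.length := hlen

theorem pvBfs_append (L : List String) :
    ∀ (M : List String) (edges : List (List String)) (seen : PySem.Set String),
    pvBfs edges (L ++ M) seen =
      pvBfs (pvChain L edges seen).edges (M ++ (pvChain L edges seen).new) (pvChain L edges seen).seen := by
  induction L with
  | nil => intro M edges seen; simp [pvChain]
  | cons u L ih =>
    intro M edges seen
    rw [List.cons_append, pvBfs_cons, List.append_assoc, ih]
    simp only [pvChain]
    rw [List.append_assoc]

theorem pvPass_append (P Q : List String) (res : PySem.Set String)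
    (edges : List (List String)) (ch : Bool) :
    pvPass (P ++ Q) res edges ch =
      pvPass Q (pvPass P res edges ch).1 (pvPass P res edges ch).2.1 (pvPass P res edges ch).2.2 := by
  simp [pvPass, List.foldl_append]

theorem pvLoop_eq_bfs (fuel : Nat) :
    ∀ (processed pending : List String) (edges : List (List String)),
    (∀ u ∈ processed, edges.filter (pvInc u) = []) →
    edges.length + 1 ≤ fuel →
    pvLoop fuel (processed ++ pending) edges = pvBfs edges pending (processed ++ pending) := by
  induction fuel with
  | zero => intro _ _ _ _ h; omega
  | succ f ih =>
    intro processed pending edges hclean hfuel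
    have hpassP : pvPass processed (processed ++ pending) edges false
        = (processed ++ pending, edges, false) := by
      rw [pvPass_eq_chain, pvChain_clean processed edges (processed ++ pending) hclean]
      rfl
    have hpass : pvPass (processed ++ pending) (processed ++ pending) edges false
        = ((pvChain pending edges (processed ++ pending)).seen,
           (pvChain pending edges (processed ++ pending)).edges,
           (pvChain pending edges (processed ++ pending)).flag) := by
      rw [pvPass_append, hpassP]
      rw [pvPass_eq_chain]
      simp
    set c := pvChain pending edges (processed ++ pending) with hc
    have hrhs : pvBfs edges pending (processed ++ pending) = pvBfs c.edges c.new c.seen := by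
      have h := pvBfs_append pending [] edges (processed ++ pending)
      rw [List.append_nil, List.nil_append] at h
      rw [h, hc]
    cases hf : c.flag with
    | false =>
      have hcc := pvChain_of_flag_false pending edges (processed ++ pending) (by rw [← hc] at *; exact hf)
      rw [← hc] at hcc
      simp only [pvLoop, hpass, hf, Bool.false_eq_true, if_false]
      rw [hrhs, hcc]
      exact (pvBfs_nil edges (processed ++ pending)).symm
    | true =>
      have hseen : c.seen = (processed ++ pending) ++ c.new := pvChain_seen pending edges _
      have hclean' : ∀ u ∈ processed ++ pending, c.edges.filter (pvInc u) = [] := by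
        intro u hu
        rcases List.mem_append.1 hu with hu | hu
        · exact pvFilter_nil_of_sublist _ _ _ (pvChain_sublist pending edges _) (hclean u hu)
        · exact pvChain_mem_clean pending edges _ u hu
      have hfuel' : c.edges.length + 1 ≤ f := by
        have hlen := pvChain_len pending edges (processed ++ pending) (hc ▸ hf)
        rw [← hc] at hlen
        omega
      simp only [pvLoop, hpass, hf, if_true]
      rw [hseen]
      rw [ih (processed ++ pending) c.new c.edges hclean' hfuel']
      rw [hrhs, hseen]

-- ===== VERDICT (by name: the statement is the Claim_ definition above) =====
theorem resolve_undecided_mappings_spec : Claim_equal_resolve_undecided_mappings := by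
  intro rc um _ _
  unfold Spec_resolve_undecided_mappings resolve_undecided_mappings resolve_undecided_mappings_alt
  have h := pvLoop_eq_bfs (um.length + 2) []
    (PySem.Set.ofList (rc.toList.map (fun c => String.ofList [c]))) um
    (by intro u hu; cases hu) (by omega)
  simpa using h
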